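-- pv_equiv track=rewrite | github.com/ItakEjgo/DataMining | function.py | con_decrease
-- ===== SOURCE A (Python) =====
-- INF = 1e9
--
-- def con_decrease(data):
--     l = len(data)
--     pre = INF
--     con = 1
--     res = {}
--     for i in range(l):
--         if data[i] < pre:
--             con += 1
--         else:
--             for j in range(1, con + 1):
--                 if j not in res:
--                     res[j] = con + 1 - j
--                 else:
--                     res[j] += con + 1 - j
--             con = 1
--         pre = data[i]
--     return res
-- ===== SOURCE B (Python) =====
-- INF = 1e9
--
-- def con_decrease(data):
--     # Pass 1: record the length of each flushed decreasing run (trailing run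
--     # is never flushed, matching the original's behaviour).
--     pre = INF
--     con = 1
--     runs = []
--     for x in data:
--         if x < pre:
--             con += 1
--         else:
--             runs.append(con)
--             con = 1
--         pre = x
--     if not runs:
--         return {}
--     # Pass 2: res[j] = sum over runs c >= j of (c + 1 - j), computed with
--     # running suffix aggregates instead of a triangular inner loop per run.
--     freq = {}
--     for c in runs:
--         freq[c] = freq.get(c, 0) + 1
--     m = max(runs)
--     s = len(runs)          # number of runs with length >= j
--     t = sum(runs) + s      # sum of (c + 1) over runs with length >= j
--     res = {}
--     for j in range(1, m + 1):
--         res[j] = t - j * s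
--         f = freq.get(j, 0)
--         s -= f
--         t -= f * (j + 1)
--     return res
-- ===== Notes on version B (the rewrite author's own statement) =====
-- stated objective: faster
-- what changed: Instead of A's per-reset inner loop that adds each run's triangular contributions into the dict while scanning, B first collects the flushed run lengths in one scan and then builds the whole result dict in a single ascending pass from running suffix aggregates (count and weighted sum of runs >= j) over a frequency table.
import Mathlib
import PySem

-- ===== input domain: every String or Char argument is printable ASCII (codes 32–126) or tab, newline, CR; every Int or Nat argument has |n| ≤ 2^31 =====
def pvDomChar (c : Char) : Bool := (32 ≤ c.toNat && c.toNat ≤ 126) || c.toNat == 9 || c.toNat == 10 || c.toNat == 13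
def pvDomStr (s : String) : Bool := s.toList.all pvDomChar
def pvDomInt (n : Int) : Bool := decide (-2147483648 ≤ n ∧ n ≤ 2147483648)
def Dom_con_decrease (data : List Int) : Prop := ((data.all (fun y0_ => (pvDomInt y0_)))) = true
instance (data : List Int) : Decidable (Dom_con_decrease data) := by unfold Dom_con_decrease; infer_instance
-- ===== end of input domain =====

-- B replaces A's per-reset triangular inner loop by collecting the flushed run lengths
-- and building the whole result dict in one ascending pass from running suffix
-- aggregates over a frequency table (alternative decomposition, same return value).
-- INF = 1e9 is modelled by the Int 10^9: for the ints admitted here Python's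
-- int-vs-float comparison with 1e9 agrees exactly with the Int comparison.

-- ===== PORT A =====
-- A's inner flush loop: for j in range(1, con+1): if j not in res: res[j] = con+1-j else: res[j] += con+1-j
def aFlush (con : Int) (res : PySem.Dict Int Int) : PySem.Dict Int Int :=
  (PySem.List.pyRange 1 (con + 1) 1).foldl (fun res j =>
    if res.contains j = false then res.insert j (con + 1 - j)
    else res.modify j 0 (· + (con + 1 - j))) res

-- one iteration of A's outer loop (state = (pre, con, res))
def aStep (data : List Int) (st : Int × Int × PySem.Dict Int Int) (i : Int) :
    Int × Int × PySem.Dict Int Int :=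
  let x := PySem.List.pyGetD data i 0   -- data[i]; i ∈ range(len(data)) is always in range
  if x < st.1 then (x, st.2.1 + 1, st.2.2)
  else (x, 1, aFlush st.2.1 st.2.2)

def con_decrease (data : List Int) : List (Int × Int) :=
  ((PySem.List.pyRange 0 (data.length : Int) 1).foldl (aStep data)
    ((1000000000 : Int), 1, PySem.Dict.empty)).2.2.items

-- ===== PORT B =====
-- B's pass 1: same pre/con logic, but each flushed run length is appended to runs
def bScan (st : Int × Int × List Int) (x : Int) : Int × Int × List Int :=
  if x < st.1 then (x, st.2.1 + 1, st.2.2)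
  else (x, 1, st.2.2 ++ [st.2.1])

-- B's pass 2 body: res[j] = t - j*s; f = freq.get(j, 0); s -= f; t -= f*(j+1)
def bStep (freq : PySem.Dict Int Int) (st : Int × Int × PySem.Dict Int Int) (j : Int) :
    Int × Int × PySem.Dict Int Int :=
  let res := st.2.2.insert j (st.2.1 - j * st.1)
  let f := freq.getD j 0
  (st.1 - f, st.2.1 - f * (j + 1), res)

def con_decrease_alt (data : List Int) : List (Int × Int) :=
  let st := data.foldl bScan ((1000000000 : Int), 1, [])
  let runs := st.2.2
  if runs = [] then []
  else
    let freq := runs.foldl (fun (d : PySem.Dict Int Int) c => d.insert c (d.getD c 0 + 1))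
      PySem.Dict.empty
    let m := (PySem.List.max? runs (fun y => y)).getD 0   -- runs ≠ [], so max? is some
    ((PySem.List.pyRange 1 (m + 1) 1).foldl (bStep freq)
      ((runs.length : Int), runs.sum + (runs.length : Int), PySem.Dict.empty)).2.2.items

-- ===== PRECONDITION & SPEC =====
def Spec_con_decrease (data : List Int) (out : List (Int × Int)) : Prop := out = con_decrease_alt data
instance (data : List Int) (out : List (Int × Int)) : Decidable (Spec_con_decrease data out) := by unfold Spec_con_decrease; infer_instance

-- ===== CLAIM (what is proved, stated in full; the proofs are below) =====
def Claim_equal_con_decrease : Prop := ∀ (data : List Int), Dom_con_decrease data → Spec_con_decrease data (con_decrease data)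

-- ===== LEMMAS AND PROOFS =====

-- value of key j in the canonical result built from the flushed run lengths runs
def runVal (runs : List Int) (j : Int) : Int :=
  ((runs.filter (fun c => j ≤ c)).map (fun c => c + 1 - j)).sum

def maxRun (runs : List Int) : Int := runs.foldl max 0

-- suffix aggregates: number of runs ≥ j and the sum of (c+1) over runs c ≥ j
def sCnt (runs : List Int) (j : Int) : Int := ((runs.filter (fun c => j ≤ c)).length : Int)

def tSum (runs : List Int) (j : Int) : Int := ((runs.filter (fun c => j ≤ c)).map (fun c => c + 1)).sum

-- A's outer loop over range(len(data)) with data[i] is a fold over data itself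
theorem foldl_aStep_eq (data : List Int) (init : Int × Int × PySem.Dict Int Int) :
    (PySem.List.pyRange 0 (data.length : Int) 1).foldl (aStep data) init =
      data.foldl (fun st x => if x < st.1 then (x, st.2.1 + 1, st.2.2)
        else (x, 1, aFlush st.2.1 st.2.2)) init := by
  conv_rhs => rw [← PySem.List.map_pyGetD_pyRange_zero data 0]
  rw [List.foldl_map]
  rfl

-- each occurrence of x in l adds con+1-x to key x, whether by insert or by modify
theorem getD_flushFold (con x : Int) (l : List Int) (d : PySem.Dict Int Int) :
    ((l.foldl (fun res j =>
      if res.contains j = false then res.insert j (con + 1 - j)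
      else res.modify j 0 (· + (con + 1 - j))) d).getD x 0) =
      d.getD x 0 + (l.count x) * (con + 1 - x) := by
  induction l generalizing d with
  | nil => simp
  | cons j t ih =>
    rw [List.foldl_cons, ih]
    have hstep : (if d.contains j = false then d.insert j (con + 1 - j)
        else d.modify j 0 (· + (con + 1 - j))).getD x 0
        = d.getD x 0 + (if x = j then con + 1 - x else 0) := by
      by_cases h1 : d.contains j = false
      · rw [if_pos h1, PySem.Dict.getD_insert]
        by_cases h2 : x = j
        · rw [if_pos h2, if_pos h2]; subst h2; rw [PySem.Dict.getD_of_not_contains d 0 h1]; ring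
        · rw [if_neg h2, if_neg h2]; ring
      · rw [if_neg h1, PySem.Dict.getD_modify]
        by_cases h2 : x = j
        · rw [if_pos h2, if_pos h2]; subst h2; ring
        · rw [if_neg h2, if_neg h2]; ring
    rw [hstep, List.count_cons]
    by_cases h : x = j
    · simp [h]; ring
    · have : ¬ (j = x) := fun hh => h hh.symm
      simp [h, this]

theorem count_pyRange_one (a b x : Int) :
    (PySem.List.pyRange a b 1).count x = if a ≤ x ∧ x < b then 1 else 0 := by
  by_cases h : a ≤ x ∧ x < b
  · rw [if_pos h]
    have hm : x ∈ PySem.List.pyRange a b 1 := PySem.List.mem_pyRange_one.mpr h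
    have hnd := PySem.List.nodup_pyRange_one a b
    have h1 : (PySem.List.pyRange a b 1).count x ≤ 1 := List.nodup_iff_count_le_one.mp hnd x
    have h2 : 0 < (PySem.List.pyRange a b 1).count x := List.count_pos_iff.mpr hm
    omega
  · rw [if_neg h]
    exact List.count_eq_zero.mpr (fun hm => h (PySem.List.mem_pyRange_one.mp hm))

theorem getD_aFlush (con x : Int) (d : PySem.Dict Int Int) :
    (aFlush con d).getD x 0 = d.getD x 0 + (if 1 ≤ x ∧ x ≤ con then con + 1 - x else 0) := by
  unfold aFlush
  rw [getD_flushFold, count_pyRange_one]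
  by_cases h : 1 ≤ x ∧ x ≤ con
  · rw [if_pos h, if_pos ⟨h.1, by omega⟩]; ring
  · rw [if_neg h, if_neg (by omega)]; ring

-- flushing keys already present only modifies, leaving the key list unchanged
theorem keys_flushFold_contained (con : Int) (l : List Int) (d : PySem.Dict Int Int)
    (h : ∀ j ∈ l, d.contains j = true) :
    (l.foldl (fun res j =>
      if res.contains j = false then res.insert j (con + 1 - j)
      else res.modify j 0 (· + (con + 1 - j))) d).keys = d.keys := by
  induction l generalizing d with
  | nil => rfl
  | cons j t ih =>
    have hj := h j (by simp)
    rw [List.foldl_cons, if_neg (by simp [hj])]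
    rw [ih _ (fun k hk => by
      rw [PySem.Dict.contains_modify]
      simp [h k (List.mem_cons_of_mem _ hk)])]
    rw [PySem.Dict.keys_modify, PySem.Dict.keys_insert_of_contains _ _ hj]

-- flushing distinct fresh keys appends them in order
theorem keys_flushFold_fresh (con : Int) (l : List Int) (d : PySem.Dict Int Int)
    (h : ∀ j ∈ l, d.contains j = false) (hnd : l.Nodup) :
    (l.foldl (fun res j =>
      if res.contains j = false then res.insert j (con + 1 - j)
      else res.modify j 0 (· + (con + 1 - j))) d).keys = d.keys ++ l := by
  induction l generalizing d with
  | nil => simp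
  | cons j t ih =>
    have hj := h j (by simp)
    rw [List.foldl_cons, if_pos hj]
    rw [ih _ (fun k hk => by
      rw [PySem.Dict.contains_insert]
      have hkj : k ≠ j := fun e => (List.nodup_cons.mp hnd).1 (e ▸ hk)
      simp [hkj, h k (List.mem_cons_of_mem _ hk)]) (List.nodup_cons.mp hnd).2]
    rw [PySem.Dict.keys_insert_of_not_contains _ _ hj]
    simp

theorem keys_aFlush (con M : Int) (d : PySem.Dict Int Int)
    (hk : d.keys = PySem.List.pyRange 1 (M + 1) 1) (_hcon : 1 ≤ con) (hM : 0 ≤ M) :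
    (aFlush con d).keys = PySem.List.pyRange 1 (max M con + 1) 1 := by
  unfold aFlush
  by_cases h : con ≤ M
  · rw [keys_flushFold_contained]
    · rw [hk, max_eq_left h]
    · intro j hj
      rw [PySem.Dict.contains_iff_mem_keys, hk, PySem.List.mem_pyRange_one]
      have := PySem.List.mem_pyRange_one.mp hj
      omega
  · have hsplit : PySem.List.pyRange 1 (con + 1) 1 =
        PySem.List.pyRange 1 (M + 1) 1 ++ PySem.List.pyRange (M + 1) (con + 1) 1 :=
      PySem.List.pyRange_one_append 1 (M + 1) (con + 1) (by omega) (by omega)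
    rw [hsplit, List.foldl_append]
    have hcont := keys_flushFold_contained con (PySem.List.pyRange 1 (M + 1) 1) d
      (fun j hj => by rw [PySem.Dict.contains_iff_mem_keys, hk]; exact hj)
    rw [keys_flushFold_fresh _ _ _ (fun j hj => by
      rw [← Bool.not_eq_true, PySem.Dict.contains_iff_mem_keys, hcont, hk,
        PySem.List.mem_pyRange_one]
      have := PySem.List.mem_pyRange_one.mp hj
      omega) (PySem.List.nodup_pyRange_one _ _)]
    rw [hcont, hk, ← PySem.List.pyRange_one_append 1 (M + 1) (con + 1) (by omega) (by omega)]
    rw [max_eq_right (by omega)]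

theorem runVal_append (runs : List Int) (con x : Int) :
    runVal (runs ++ [con]) x = runVal runs x + (if x ≤ con then con + 1 - x else 0) := by
  unfold runVal
  rw [List.filter_append, List.map_append, List.sum_append]
  by_cases h : x ≤ con <;> simp [h]

theorem maxRun_append (runs : List Int) (con : Int) :
    maxRun (runs ++ [con]) = max (maxRun runs) con := by
  unfold maxRun; rw [List.foldl_append]; rfl

theorem maxRun_nonneg (runs : List Int) : 0 ≤ maxRun runs :=
  (PySem.List.le_foldl_max runs 0).1

-- main loop invariant: A's dict is throughout the canonical dict of B's collected runs
theorem scanInv (data : List Int) :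
    ∀ (pre con : Int) (d : PySem.Dict Int Int) (runs : List Int), 1 ≤ con →
    (∀ r ∈ runs, 1 ≤ r) →
    d.keys = PySem.List.pyRange 1 (maxRun runs + 1) 1 →
    (∀ x, 1 ≤ x → d.getD x 0 = runVal runs x) →
    (data.foldl (fun st x => if x < st.1 then (x, st.2.1 + 1, st.2.2)
        else (x, 1, aFlush st.2.1 st.2.2)) (pre, con, d)).1
      = (data.foldl bScan (pre, con, runs)).1 ∧
    (data.foldl (fun st x => if x < st.1 then (x, st.2.1 + 1, st.2.2)
        else (x, 1, aFlush st.2.1 st.2.2)) (pre, con, d)).2.1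
      = (data.foldl bScan (pre, con, runs)).2.1 ∧
    1 ≤ (data.foldl bScan (pre, con, runs)).2.1 ∧
    (∀ r ∈ (data.foldl bScan (pre, con, runs)).2.2, 1 ≤ r) ∧
    (data.foldl (fun st x => if x < st.1 then (x, st.2.1 + 1, st.2.2)
        else (x, 1, aFlush st.2.1 st.2.2)) (pre, con, d)).2.2.keys
      = PySem.List.pyRange 1 (maxRun (data.foldl bScan (pre, con, runs)).2.2 + 1) 1 ∧
    (∀ x, 1 ≤ x →
      (data.foldl (fun st x => if x < st.1 then (x, st.2.1 + 1, st.2.2)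
        else (x, 1, aFlush st.2.1 st.2.2)) (pre, con, d)).2.2.getD x 0
        = runVal (data.foldl bScan (pre, con, runs)).2.2 x) := by
  induction data with
  | nil =>
    intro pre con d runs hcon hall hk hg
    exact ⟨rfl, rfl, hcon, hall, hk, hg⟩
  | cons x t ih =>
    intro pre con d runs hcon hall hk hg
    by_cases hx : x < pre
    · simp only [List.foldl_cons, bScan, if_pos hx]
      exact ih x (con + 1) d runs (by omega) hall hk hg
    · simp only [List.foldl_cons, bScan, if_neg hx]
      refine ih x 1 (aFlush con d) (runs ++ [con]) (by omega)
        (fun r hr => by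
          rcases List.mem_append.mp hr with h | h
          · exact hall r h
          · simp at h; omega)
        ?_ ?_
      · rw [keys_aFlush con (maxRun runs) d hk hcon (maxRun_nonneg runs), ← maxRun_append]
      · intro y hy
        rw [getD_aFlush, hg y hy, runVal_append]
        by_cases h : y ≤ con
        · rw [if_pos ⟨hy, h⟩, if_pos h]
        · rw [if_neg (by omega), if_neg h]

theorem sum_map_sub_const (j : Int) (l : List Int) :
    (l.map (fun c => c + 1 - j)).sum = (l.map (fun c => c + 1)).sum - j * l.length := by
  induction l with
  | nil => simp
  | cons c t ih => simp [ih]; ring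

theorem tSum_sub (runs : List Int) (j : Int) :
    tSum runs j - j * sCnt runs j = runVal runs j := by
  unfold tSum sCnt runVal
  rw [sum_map_sub_const]

theorem sCnt_one (runs : List Int) (h : ∀ r ∈ runs, 1 ≤ r) :
    sCnt runs 1 = (runs.length : Int) := by
  unfold sCnt
  rw [List.filter_eq_self.mpr (fun c hc => by simpa using h c hc)]

theorem sum_map_add_one (l : List Int) :
    (l.map (fun c => c + 1)).sum = l.sum + (l.length : Int) := by
  induction l with
  | nil => simp
  | cons c t ih => simp [ih]; ring

theorem tSum_one (runs : List Int) (h : ∀ r ∈ runs, 1 ≤ r) :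
    tSum runs 1 = runs.sum + (runs.length : Int) := by
  unfold tSum
  rw [List.filter_eq_self.mpr (fun c hc => by simpa using h c hc), sum_map_add_one]

theorem sCnt_succ (runs : List Int) (j : Int) :
    sCnt runs j - runs.count j = sCnt runs (j + 1) := by
  induction runs with
  | nil => simp [sCnt]
  | cons c t ih =>
    unfold sCnt at ih ⊢
    rcases lt_trichotomy c j with h | h | h
    · have h1 : ¬ (j ≤ c) := by omega
      have h2 : ¬ (j + 1 ≤ c) := by omega
      have h3 : ¬ (c = j) := by omega
      simp only [List.filter_cons, List.count_cons, beq_iff_eq, h1, h2, h3,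
        decide_false, if_false, Bool.false_eq_true]
      push_cast at ih ⊢; omega
    · subst h
      have h1 : (c ≤ c) := le_refl _
      have h2 : ¬ (c + 1 ≤ c) := by omega
      simp only [List.filter_cons, List.count_cons, beq_iff_eq, h1, h2,
        decide_true, decide_false, if_true, if_false, Bool.false_eq_true, List.length_cons]
      push_cast at ih ⊢; omega
    · have h1 : (j ≤ c) := by omega
      have h2 : (j + 1 ≤ c) := by omega
      have h3 : ¬ (c = j) := by omega
      simp only [List.filter_cons, List.count_cons, beq_iff_eq, h1, h2, h3,
        decide_true, if_true, List.length_cons]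
      push_cast at ih ⊢; omega

theorem tSum_succ (runs : List Int) (j : Int) :
    tSum runs j - (runs.count j : Int) * (j + 1) = tSum runs (j + 1) := by
  induction runs with
  | nil => simp [tSum]
  | cons c t ih =>
    unfold tSum at ih ⊢
    rcases lt_trichotomy c j with h | h | h
    · have h1 : ¬ (j ≤ c) := by omega
      have h2 : ¬ (j + 1 ≤ c) := by omega
      have h3 : ¬ (c = j) := by omega
      simp only [List.filter_cons, List.count_cons, beq_iff_eq, h1, h2, h3,
        decide_false, if_false, Bool.false_eq_true]
      push_cast at ih ⊢; simp only [add_zero]; omega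
    · subst h
      have h1 : (c ≤ c) := le_refl _
      have h2 : ¬ (c + 1 ≤ c) := by omega
      simp only [List.filter_cons, List.count_cons, beq_iff_eq, h1, h2,
        decide_true, decide_false, if_true, if_false, Bool.false_eq_true,
        List.map_cons, List.sum_cons]
      push_cast at ih ⊢; nlinarith [ih]
    · have h1 : (j ≤ c) := by omega
      have h2 : (j + 1 ≤ c) := by omega
      have h3 : ¬ (c = j) := by omega
      simp only [List.filter_cons, List.count_cons, beq_iff_eq, h1, h2, h3,
        decide_true, if_true, List.map_cons, List.sum_cons]
      push_cast at ih ⊢; simp only [add_zero]; omega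

-- B's second pass builds exactly the ascending canonical items of runs
theorem phase2 (runs : List Int) (M : Int) :
    ∀ (n : Nat) (lo : Int) (res : PySem.Dict Int Int), 1 ≤ lo → lo + n = M + 1 →
    (∀ j, lo ≤ j → res.contains j = false) →
    ((PySem.List.pyRange lo (M + 1) 1).foldl
      (bStep (runs.foldl (fun (d : PySem.Dict Int Int) c => d.insert c (d.getD c 0 + 1))
        PySem.Dict.empty))
      (sCnt runs lo, tSum runs lo, res)).2.2.items =
      res.items ++ (PySem.List.pyRange lo (M + 1) 1).map (fun j => (j, runVal runs j)) := by
  intro n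
  induction n with
  | zero =>
    intro lo res hlo hn hres
    have : PySem.List.pyRange lo (M + 1) 1 = [] := by
      rw [PySem.List.pyRange_one]
      have : (M + 1 - lo).toNat = 0 := by omega
      rw [this]; simp
    rw [this]; simp
  | succ n ih =>
    intro lo res hlo hn hres
    have hlt : lo < M + 1 := by omega
    rw [PySem.List.pyRange_one_cons hlt, List.foldl_cons, List.map_cons]
    have hf : (runs.foldl (fun (d : PySem.Dict Int Int) c => d.insert c (d.getD c 0 + 1))
        PySem.Dict.empty).getD lo 0 = (runs.count lo : Int) := by
      rw [PySem.Dict.getD_foldl_insert_add_one, PySem.Dict.getD_empty, zero_add]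
    have hstep : bStep (runs.foldl (fun (d : PySem.Dict Int Int) c => d.insert c (d.getD c 0 + 1))
        PySem.Dict.empty) (sCnt runs lo, tSum runs lo, res) lo
        = (sCnt runs (lo + 1), tSum runs (lo + 1), res.insert lo (runVal runs lo)) := by
      simp only [bStep, hf]
      rw [sCnt_succ, tSum_succ, tSum_sub]
    rw [hstep, ih (lo + 1) _ (by omega) (by omega) (fun j hj => by
      rw [PySem.Dict.contains_insert]
      have : ¬ (j = lo) := by omega
      simp [this, hres j (by omega)])]
    rw [PySem.Dict.items_insert_of_not_contains _ _ (hres lo (le_refl _))]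
    simp

-- max(runs) in B is the running max that the invariant uses
theorem max?_eq_maxRun (runs : List Int) (hne : runs ≠ []) (h : ∀ r ∈ runs, 1 ≤ r) :
    PySem.List.max? runs (fun y => y) = some (runs.foldl max 0) := by
  obtain ⟨a, t, rfl⟩ := List.exists_cons_of_ne_nil hne
  rw [PySem.List.max?_id_cons]
  have ha : max 0 a = a := max_eq_right (le_trans (by omega) (h a (by simp)))
  rw [List.foldl_cons, ha]

-- ===== VERDICT (by name: the statement is the Claim_ definition above) =====
theorem con_decrease_spec : Claim_equal_con_decrease := by
  intro data _hdom
  unfold Spec_con_decrease con_decrease con_decrease_alt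
  rw [foldl_aStep_eq]
  have hk0 : (PySem.Dict.empty : PySem.Dict Int Int).keys
      = PySem.List.pyRange 1 (maxRun [] + 1) 1 := by
    rw [PySem.Dict.keys_empty]
    have : maxRun [] = 0 := rfl
    rw [this, PySem.List.pyRange_one]
    simp
  have H := scanInv data 1000000000 1 PySem.Dict.empty [] (by omega) (by simp) hk0
    (fun x _hx => by rw [PySem.Dict.getD_empty]; rfl)
  obtain ⟨h1, h2, hcon, hall, hkeys, hgetD⟩ := H
  set A := data.foldl (fun st x => if x < st.1 then (x, st.2.1 + 1, st.2.2)
        else (x, 1, aFlush st.2.1 st.2.2)) ((1000000000 : Int), 1, PySem.Dict.empty) with hA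
  set B := data.foldl bScan ((1000000000 : Int), 1, ([] : List Int)) with hB
  set runs := B.2.2 with hruns
  have hnodup : A.2.2.keys.Nodup := by rw [hkeys]; exact PySem.List.nodup_pyRange_one _ _
  have hitems : A.2.2.items = (PySem.List.pyRange 1 (maxRun runs + 1) 1).map
      (fun k => (k, runVal runs k)) := by
    rw [PySem.Dict.items_eq_map_keys A.2.2 hnodup 0, hkeys]
    exact List.map_congr_left (fun k hk => by
      rw [hgetD k (PySem.List.mem_pyRange_one.mp hk).1])
  by_cases hne : runs = []
  · rw [if_pos hne, hitems, hne]
    have : maxRun [] = 0 := rfl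
    rw [this, PySem.List.pyRange_one]
    simp
  · rw [if_neg hne, hitems]
    rw [max?_eq_maxRun runs hne hall]
    have hM : (Option.some (runs.foldl max 0)).getD 0 = maxRun runs := rfl
    rw [hM]
    have hinit : ((runs.length : Int), runs.sum + (runs.length : Int),
        (PySem.Dict.empty : PySem.Dict Int Int))
        = (sCnt runs 1, tSum runs 1, PySem.Dict.empty) := by
      rw [sCnt_one runs hall, tSum_one runs hall]
    rw [hinit]
    have hP := phase2 runs (maxRun runs) (maxRun runs).toNat 1 PySem.Dict.empty (le_refl _)
      (by have := maxRun_nonneg runs; omega)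
      (fun j _ => PySem.Dict.contains_empty j)
    rw [hP]
    rfl
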